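-- pv_equiv track=rewrite | github.com/sabarabara/EPC | utils/data_utils.py | filter_by_agreement
-- ===== SOURCE A (Python) =====
-- from collections import defaultdict
--
-- def filter_by_agreement(utterances: list) -> list:
--     """評価者間で一致した発話のみを残す
--
--     IEMOCAPでは同一発話に2人の評価者がラベルを付与。
--     EmoEvaluationファイル内の同一utt_idが2回出現し、
--     両方が同じラベルの場合のみ採用。
--     """
--     utt_labels = defaultdict(list)
--     for utt in utterances:
--         utt_labels[utt["utt_id"]].append(utt["emotion"])
--
--     agreed_ids = set()
--     for utt_id, labels in utt_labels.items():
--         if len(labels) == 2 and labels[0] == labels[1]: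
--             agreed_ids.add(utt_id)
--
--     return [u for u in utterances if u["utt_id"] in agreed_ids]
-- ===== SOURCE B (Python) =====
-- def filter_by_agreement(utterances: list) -> list:
--     """評価者間で一致した発話のみを残す (direct per-utterance check: no dict, no set)"""
--     def keep(u):
--         same = [v for v in utterances if v["utt_id"] == u["utt_id"]]
--         return len(same) == 2 and all(v["emotion"] == u["emotion"] for v in same)
--     return [u for u in utterances if keep(u)]
-- ===== Notes on version B (the rewrite author's own statement) =====
-- stated objective: alternative
-- what changed: Replaces A's three-stage hash pipeline (group labels per id into a defaultdict, scan the groups into an agreed-id set, filter by set membership) with a direct per-utterance check that scans the whole list for entries sharing the utterance's id and tests their count and label agreement in place, using no dict or set at all.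
import Mathlib
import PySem

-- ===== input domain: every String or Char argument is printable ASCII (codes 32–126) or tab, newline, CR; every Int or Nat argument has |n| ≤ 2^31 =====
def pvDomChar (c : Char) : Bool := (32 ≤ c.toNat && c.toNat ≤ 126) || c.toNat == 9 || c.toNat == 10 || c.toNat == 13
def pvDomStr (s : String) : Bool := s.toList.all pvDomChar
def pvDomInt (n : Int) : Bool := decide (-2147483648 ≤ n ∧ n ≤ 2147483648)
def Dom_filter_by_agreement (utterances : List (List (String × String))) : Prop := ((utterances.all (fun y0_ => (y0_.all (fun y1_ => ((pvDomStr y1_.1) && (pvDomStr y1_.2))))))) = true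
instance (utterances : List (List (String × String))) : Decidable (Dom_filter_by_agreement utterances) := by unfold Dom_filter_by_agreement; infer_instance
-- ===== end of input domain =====

-- B replaces A's hash pipeline (group labels per id, scan groups into an agreed set, filter by
-- membership) with a direct per-utterance scan of the list itself (objective: alternative, not faster).


-- ===== PORT A =====
-- shared helper: Python's u[k] on a dict, total form (key present under Pre_, so exact there)
def pvLookup (u : List (String × String)) (k : String) : String :=
  (PySem.Dict.mk u).getD k ""

-- the test 'len(labels) == 2 and labels[0] == labels[1]' (total pyGetD: the indices only matter
-- when the length guard holds, so the default never decides — exact there)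
def pvCondA (labels : List String) : Bool :=
  decide (PySem.List.len labels = 2) &&
    (PySem.List.pyGetD labels 0 "" == PySem.List.pyGetD labels 1 "")

-- loop body of 'utt_labels[utt["utt_id"]].append(utt["emotion"])' (defaultdict(list))
def pvStepA (d : PySem.Dict String (List String)) (u : List (String × String)) :
    PySem.Dict String (List String) :=
  d.modify (pvLookup u "utt_id") [] (fun ls => ls ++ [pvLookup u "emotion"])

def pvAgreedStep (s : PySem.Set String) (p : String × List String) : PySem.Set String :=
  if pvCondA p.2 then PySem.Set.add s p.1 else s

def filter_by_agreement (utterances : List (List (String × String))) :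
    List (List (String × String)) :=
  let utt_labels : PySem.Dict String (List String) :=
    utterances.foldl pvStepA PySem.Dict.empty
  let agreed_ids : PySem.Set String :=
    utt_labels.items.foldl pvAgreedStep PySem.Set.empty
  utterances.filter (fun u => PySem.Set.contains agreed_ids (pvLookup u "utt_id"))

-- ===== PORT B =====
-- 'keep(u)': scan the whole list for entries sharing u's id, require exactly two of them
-- all carrying u's own emotion
def pvKeepB (utterances : List (List (String × String))) (u : List (String × String)) : Bool :=
  let same := utterances.filter (fun v => pvLookup v "utt_id" == pvLookup u "utt_id")
  decide (same.length = 2) && same.all (fun v => pvLookup v "emotion" == pvLookup u "emotion")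

def filter_by_agreement_alt (utterances : List (List (String × String))) :
    List (List (String × String)) :=
  utterances.filter (pvKeepB utterances)

-- ===== PRECONDITION & SPEC =====
-- Pre_: every utterance dict carries the keys "utt_id" and "emotion"; on any other input
-- Python A raises KeyError (returns nothing), so those inputs are excluded.
def Pre_filter_by_agreement (utterances : List (List (String × String))) : Prop :=
  ∀ u ∈ utterances, "utt_id" ∈ u.map Prod.fst ∧ "emotion" ∈ u.map Prod.fst
instance (utterances : List (List (String × String))) : Decidable (Pre_filter_by_agreement utterances) := by
  unfold Pre_filter_by_agreement; infer_instance

def pvWitness_filter_by_agreement : (List (List (String × String))) :=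
  [[("utt_id", "a"), ("emotion", "hap")], [("utt_id", "a"), ("emotion", "hap")],
   [("utt_id", "b"), ("emotion", "sad")]]

def Spec_filter_by_agreement (utterances : List (List (String × String))) (out : List (List (String × String))) : Prop := out = filter_by_agreement_alt utterances
instance (utterances : List (List (String × String))) (out : List (List (String × String))) : Decidable (Spec_filter_by_agreement utterances out) := by unfold Spec_filter_by_agreement; infer_instance

-- ===== CLAIM (what is proved, stated in full; the proofs are below) =====
def Claim_equal_filter_by_agreement : Prop := ∀ (utterances : List (List (String × String))), Dom_filter_by_agreement utterances → Pre_filter_by_agreement utterances → Spec_filter_by_agreement utterances (filter_by_agreement utterances)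

-- ===== LEMMAS AND PROOFS =====

-- A's grouped label list for id c is exactly the emotions of the entries whose id is c
lemma pvLabels_eq (utterances : List (List (String × String))) (c : String) :
    (utterances.foldl pvStepA PySem.Dict.empty).getD c []
      = (utterances.filter (fun v => pvLookup v "utt_id" == c)).map
          (fun v => pvLookup v "emotion") := by
  have hfold : utterances.foldl pvStepA PySem.Dict.empty
      = (utterances.map (fun u => (pvLookup u "utt_id", pvLookup u "emotion"))).foldl
          (fun d p => d.modify p.1 [] (fun ls => ls ++ [p.2])) PySem.Dict.empty := by
    rw [List.foldl_map]; rfl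
  rw [hfold, PySem.Dict.getD_foldl_modify_append, PySem.Dict.getD_empty,
    List.filter_map, List.map_map]
  simp [Function.comp_def]

lemma pvNodupA (utterances : List (List (String × String))) :
    (utterances.foldl pvStepA PySem.Dict.empty).keys.Nodup := by
  exact PySem.Dict.nodup_keys_foldl_modify_key utterances (fun u => pvLookup u "utt_id")
    [] (fun _ u => fun ls => ls ++ [pvLookup u "emotion"]) PySem.Dict.empty (by simp)

lemma pvAgreed_mem (items : List (String × List String)) :
    ∀ (s0 : PySem.Set String) (id : String),
      (id ∈ items.foldl pvAgreedStep s0) ↔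
        id ∈ s0 ∨ ∃ ls, (id, ls) ∈ items ∧ pvCondA ls = true := by
  induction items with
  | nil => intro s0 id; simp
  | cons p rest ih =>
    intro s0 id
    obtain ⟨k, ls⟩ := p
    simp only [List.foldl_cons]
    rw [ih]
    unfold pvAgreedStep
    by_cases hc : pvCondA ls = true
    · simp only [hc, if_true, PySem.Set.mem_add]
      constructor
      · rintro (⟨h | h⟩ | ⟨ls', hmem, hcond⟩)
        · exact Or.inl h
        · exact Or.inr ⟨ls, by simp [h], hc⟩
        · exact Or.inr ⟨ls', by simp [hmem], hcond⟩
      · rintro (h | ⟨ls', hmem, hcond⟩)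
        · exact Or.inl (Or.inl h)
        · rcases List.mem_cons.mp hmem with heq | hmem'
          · exact Or.inl (Or.inr (congrArg Prod.fst heq))
          · exact Or.inr ⟨ls', hmem', hcond⟩
    · rw [if_neg hc]
      constructor
      · rintro (h | ⟨ls', hmem, hcond⟩)
        · exact Or.inl h
        · exact Or.inr ⟨ls', by simp [hmem], hcond⟩
      · rintro (h | ⟨ls', hmem, hcond⟩)
        · exact Or.inl h
        · rcases List.mem_cons.mp hmem with heq | hmem'
          · cases heq; exact absurd hcond hc
          · exact Or.inr ⟨ls', hmem', hcond⟩

-- the two agreement tests coincide on a label list that contains e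
lemma pvCond_equiv (ls : List String) (e : String) (he : e ∈ ls) :
    pvCondA ls = (decide (ls.length = 2) && ls.all (· == e)) := by
  match ls with
  | [] => cases he
  | [a] => simp [pvCondA]
  | [a, b] =>
    have h1 : PySem.List.pyGetD [a, b] 1 "" = b := by
      have := PySem.List.pyGetD_ofNat [a, b] 1 "" (by simp)
      simpa using this
    simp only [pvCondA, PySem.List.len_eq, PySem.List.pyGetD_zero_cons, h1,
      List.length_cons, List.length_nil, List.all_cons, List.all_nil, Bool.and_true]
    rcases List.mem_pair.mp he with h | h
    · subst h; by_cases hab : e = b <;> simp [hab, eq_comm]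
    · subst h; simp
  | a :: b :: c :: t =>
    simp [pvCondA]
    omega

-- A's membership test equals B's keep test for any u in the list
lemma pvPred_eq (utterances : List (List (String × String))) (u : List (String × String))
    (hu : u ∈ utterances) :
    PySem.Set.contains
        ((utterances.foldl pvStepA PySem.Dict.empty).items.foldl pvAgreedStep PySem.Set.empty)
        (pvLookup u "utt_id")
      = pvKeepB utterances u := by
  set uid := pvLookup u "utt_id" with huid
  set dA := utterances.foldl pvStepA PySem.Dict.empty with hdA
  have hnd : dA.keys.Nodup := pvNodupA utterances
  set ls := (utterances.filter (fun v => pvLookup v "utt_id" == uid)).map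
      (fun v => pvLookup v "emotion") with hls
  have hgetD : dA.getD uid [] = ls := pvLabels_eq utterances uid
  have hmemu : u ∈ utterances.filter (fun v => pvLookup v "utt_id" == uid) :=
    List.mem_filter.mpr ⟨hu, by simp [huid]⟩
  have hein : pvLookup u "emotion" ∈ ls := List.mem_map.mpr ⟨u, hmemu, rfl⟩
  have hne : ls ≠ [] := by intro h; rw [h] at hein; cases hein
  have hget? : dA.get? uid = some ls := by
    cases hg : dA.get? uid with
    | none =>
      have := PySem.Dict.getD_eq_get?_getD dA uid []
      rw [hg] at this; simp at this
      exact absurd (this ▸ hgetD).symm hne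
    | some v =>
      have := PySem.Dict.getD_eq_get?_getD dA uid []
      rw [hg] at this; simp at this
      rw [hgetD] at this; rw [this]
  have hmemiff : (uid ∈ dA.items.foldl pvAgreedStep PySem.Set.empty) ↔ pvCondA ls = true := by
    rw [pvAgreed_mem]
    constructor
    · rintro (h | ⟨ls', hin, hcond⟩)
      · simp [PySem.Set.empty] at h
      · have := PySem.Dict.get?_of_mem_items dA hin hnd
        rw [hget?] at this
        cases Option.some_injective _ this
        exact hcond
    · intro hc
      exact Or.inr ⟨ls, PySem.Dict.mem_items_of_get?_eq_some dA hget?, hc⟩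
  have hkeep : pvKeepB utterances u
      = (decide (ls.length = 2) && ls.all (· == pvLookup u "emotion")) := by
    unfold pvKeepB
    rw [hls]
    simp only [List.length_map, List.all_map]
    rfl
  rw [hkeep, ← pvCond_equiv ls (pvLookup u "emotion") hein]
  by_cases hc : pvCondA ls = true
  · rw [hc]; exact (PySem.Set.contains_iff _ _).mpr (hmemiff.mpr hc)
  · rw [Bool.not_eq_true] at hc
    rw [hc]
    exact Bool.eq_false_iff.mpr (fun h => by
      have := hmemiff.mp ((PySem.Set.contains_iff _ _).mp h)
      rw [hc] at this; exact Bool.false_ne_true this)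

-- ===== VERDICT (by name: the statement is the Claim_ definition above) =====
theorem filter_by_agreement_spec : Claim_equal_filter_by_agreement := by
  intro utterances _hdom _hpre
  unfold Spec_filter_by_agreement filter_by_agreement filter_by_agreement_alt
  exact List.filter_congr (fun u hu => pvPred_eq utterances u hu)
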